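-- pv_equiv track=rewrite | github.com/CenterForMedicalGeneticsGhent/WisecondorX | src/wisecondorx/newref_tools.py | _split_by_chr
-- ===== SOURCE A (Python) =====
-- from typing import List, Tuple, Optional
--
-- def _split_by_chr(
--     start: int, end: int, chr_bin_sums: List[int]
-- ) -> List[List[int]]:
--     areas = []
--     tmp = [0, start, 0]
--     for i, val in enumerate(chr_bin_sums):
--         tmp[0] = i
--         if val >= end:
--             break
--         if start < val < end:
--             tmp[2] = val
--             areas.append(tmp)
--             tmp = [i, val, 0]
--         tmp[1] = val
--     tmp[2] = end
--     areas.append(tmp)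
--     return areas
-- ===== SOURCE B (Python) =====
-- from typing import List
--
-- def _split_by_chr(
--     start: int, end: int, chr_bin_sums: List[int]
-- ) -> List[List[int]]:
--     n = len(chr_bin_sums)
--     # index of the first cumulative sum >= end (n if none)
--     k = n
--     for i, v in enumerate(chr_bin_sums):
--         if v >= end:
--             k = i
--             break
--     # one segment per index before k whose value exceeds start;
--     # its low bound is the previous value (start for index 0)
--     areas = [
--         [i, chr_bin_sums[i - 1] if i else start, chr_bin_sums[i]]
--         for i in range(k)
--         if chr_bin_sums[i] > start
--     ]
--     # terminal segment up to end
--     idx = k if k < n else (n - 1 if n else 0)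
--     low = chr_bin_sums[k - 1] if k else start
--     areas.append([idx, low, end])
--     return areas
-- ===== Notes on version B (the rewrite author's own statement) =====
-- stated objective: alternative
-- what changed: B first finds the break index k (first value >= end), then constructs the output directly by a closed-form rule over indices < k (segment low = previous value, start at index 0) plus one terminal segment, instead of A's single scan that mutates and re-allocates a running tmp triple.
import Mathlib
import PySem

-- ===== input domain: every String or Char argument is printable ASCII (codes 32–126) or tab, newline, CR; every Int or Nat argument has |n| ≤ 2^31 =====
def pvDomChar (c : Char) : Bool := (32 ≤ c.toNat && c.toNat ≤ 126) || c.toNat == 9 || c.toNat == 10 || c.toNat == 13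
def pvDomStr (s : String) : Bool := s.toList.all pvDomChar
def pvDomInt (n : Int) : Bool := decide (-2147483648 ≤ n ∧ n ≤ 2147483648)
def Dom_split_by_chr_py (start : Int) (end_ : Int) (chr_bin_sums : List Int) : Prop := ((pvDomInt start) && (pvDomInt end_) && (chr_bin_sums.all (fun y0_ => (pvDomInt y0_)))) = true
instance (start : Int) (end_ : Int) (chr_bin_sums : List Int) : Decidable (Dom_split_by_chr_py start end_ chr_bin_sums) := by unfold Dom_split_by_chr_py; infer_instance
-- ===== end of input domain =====

-- B constructs the segments directly from the break index k by a closed-form rule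
-- instead of A's stateful scan over a mutated tmp triple (alternative decomposition, same cost).


-- ===== PORT A =====
-- A's loop: tmp = (index, low, high); on break return current state; on emit append tmp
-- (with high = val) and start a fresh tmp; 'tmp[1] = val' runs in both non-break branches.
def splitLoopA (start end_ : Int) : List Int → Nat → (Int × Int × Int) → List (List Int) →
    (List (List Int)) × (Int × Int × Int)
  | [], _, tmp, areas => (areas, tmp)
  | v :: rest, i, tmp, areas =>
    let tmp1 : Int × Int × Int := ((i : Int), tmp.2.1, tmp.2.2)   -- tmp[0] = i
    if v ≥ end_ then (areas, tmp1)                                 -- break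
    else if start < v ∧ v < end_ then
      -- tmp[2] = val; areas.append(tmp); tmp = [i, val, 0]; tmp[1] = val
      splitLoopA start end_ rest (i + 1) ((i : Int), v, 0)
        (areas ++ [[tmp1.1, tmp1.2.1, v]])
    else
      splitLoopA start end_ rest (i + 1) (tmp1.1, v, tmp1.2.2) areas   -- tmp[1] = val

def split_by_chr_py (start : Int) (end_ : Int) (chr_bin_sums : List Int) : List (List Int) :=
  let r := splitLoopA start end_ chr_bin_sums 0 (0, start, 0) []
  r.1 ++ [[r.2.1, r.2.2.1, end_]]                                  -- tmp[2] = end; areas.append(tmp)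

-- ===== PORT B =====
-- Source B's first loop: index of the first value ≥ end_, or the length if none.
def firstGE (end_ : Int) : List Int → Nat
  | [] => 0
  | v :: rest => if v ≥ end_ then 0 else firstGE end_ rest + 1

def split_by_chr_py_alt (start : Int) (end_ : Int) (chr_bin_sums : List Int) : List (List Int) :=
  let n := chr_bin_sums.length
  let k := firstGE end_ chr_bin_sums
  let areas := (List.range k).filterMap (fun i =>
    if chr_bin_sums.getD i 0 > start then
      some [(i : Int), if i = 0 then start else chr_bin_sums.getD (i - 1) 0, chr_bin_sums.getD i 0]
    else none)
  let idx : Int := if k < n then (k : Int) else if n = 0 then 0 else ((n - 1 : Nat) : Int)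
  let low : Int := if k = 0 then start else chr_bin_sums.getD (k - 1) 0
  areas ++ [[idx, low, end_]]

-- ===== PRECONDITION & SPEC =====
def Spec_split_by_chr_py (start : Int) (end_ : Int) (chr_bin_sums : List Int) (out : List (List Int)) : Prop := out = split_by_chr_py_alt start end_ chr_bin_sums
instance (start : Int) (end_ : Int) (chr_bin_sums : List Int) (out : List (List Int)) : Decidable (Spec_split_by_chr_py start end_ chr_bin_sums out) := by unfold Spec_split_by_chr_py; infer_instance

-- ===== CLAIM (what is proved, stated in full; the proofs are below) =====
def Claim_equal_split_by_chr_py : Prop := ∀ (start : Int) (end_ : Int) (chr_bin_sums : List Int), Dom_split_by_chr_py start end_ chr_bin_sums → Spec_split_by_chr_py start end_ chr_bin_sums (split_by_chr_py start end_ chr_bin_sums)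

-- ===== LEMMAS AND PROOFS =====

-- The list of segments A's loop emits, written as a recursion (proof helper).
def emittedRec (start end_ : Int) : List Int → Nat → Int → List (List Int)
  | [], _, _ => []
  | v :: rest, i0, q =>
    if v ≥ end_ then []
    else (if start < v then [[(i0 : Int), q, v]] else []) ++ emittedRec start end_ rest (i0 + 1) v

theorem firstGE_le_length (end_ : Int) (sums : List Int) : firstGE end_ sums ≤ sums.length := by
  induction sums with
  | nil => simp [firstGE]
  | cons v rest ih => simp only [firstGE, List.length_cons]; split_ifs <;> omega

theorem loopA_areas (start end_ : Int) :
    ∀ (sums : List Int) (i0 : Nat) (p q r : Int) (areas : List (List Int)),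
      (splitLoopA start end_ sums i0 (p, q, r) areas).1 =
        areas ++ emittedRec start end_ sums i0 q := by
  intro sums
  induction sums with
  | nil => intro i0 p q r areas; simp [splitLoopA, emittedRec]
  | cons v rest ih =>
    intro i0 p q r areas
    by_cases hge : v ≥ end_
    · simp [splitLoopA, emittedRec, hge]
    · have hlt : v < end_ := lt_of_not_ge hge
      by_cases hs : start < v
      · simp only [splitLoopA, if_neg hge, if_pos (show start < v ∧ v < end_ from ⟨hs, hlt⟩)]
        rw [ih, emittedRec, if_neg hge, if_pos hs]
        simp
      · have hnot : ¬ (start < v ∧ v < end_) := fun h => hs h.1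
        simp only [splitLoopA, if_neg hge, if_neg hnot]
        rw [ih, emittedRec, if_neg hge, if_neg hs]
        simp

theorem loopA_idx (start end_ : Int) :
    ∀ (sums : List Int) (i0 : Nat) (p q r : Int) (areas : List (List Int)),
      (splitLoopA start end_ sums i0 (p, q, r) areas).2.1 =
        (if firstGE end_ sums < sums.length then ((i0 + firstGE end_ sums : Nat) : Int)
         else if sums.length = 0 then p else ((i0 + sums.length - 1 : Nat) : Int)) := by
  intro sums
  induction sums with
  | nil => intro i0 p q r areas; simp [splitLoopA, firstGE]
  | cons v rest ih =>
    intro i0 p q r areas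
    by_cases hge : v ≥ end_
    · have h0 : firstGE end_ (v :: rest) = 0 := by simp [firstGE, hge]
      rw [h0]
      simp [splitLoopA, if_pos hge]
    · have hlt : v < end_ := lt_of_not_ge hge
      have hk : firstGE end_ (v :: rest) = firstGE end_ rest + 1 := by simp [firstGE, hge]
      have hle := firstGE_le_length end_ rest
      have step : ∀ (q' r' : Int) (areas' : List (List Int)),
          (splitLoopA start end_ rest (i0 + 1) ((i0 : Int), q', r') areas').2.1 =
            (if firstGE end_ (v :: rest) < (v :: rest).length
             then ((i0 + firstGE end_ (v :: rest) : Nat) : Int)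
             else if (v :: rest).length = 0 then p
             else ((i0 + (v :: rest).length - 1 : Nat) : Int)) := by
        intro q' r' areas'
        rw [ih (i0 + 1) ((i0 : Int)) q' r' areas', hk]
        simp only [List.length_cons]
        by_cases hc : firstGE end_ rest < rest.length
        · rw [if_pos hc, if_pos (show firstGE end_ rest + 1 < rest.length + 1 by omega)]
          omega
        · rw [if_neg hc, if_neg (show ¬ (firstGE end_ rest + 1 < rest.length + 1) by omega),
            if_neg (Nat.succ_ne_zero _)]
          by_cases h0 : rest.length = 0
          · rw [if_pos h0]; omega
          · rw [if_neg h0]; omega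
      by_cases hs : start < v
      · simp only [splitLoopA, if_neg hge, if_pos (show start < v ∧ v < end_ from ⟨hs, hlt⟩)]
        exact step _ _ _
      · have hnot : ¬ (start < v ∧ v < end_) := fun h => hs h.1
        simp only [splitLoopA, if_neg hge, if_neg hnot]
        exact step _ _ _

theorem loopA_low (start end_ : Int) :
    ∀ (sums : List Int) (i0 : Nat) (p q r : Int) (areas : List (List Int)),
      (splitLoopA start end_ sums i0 (p, q, r) areas).2.2.1 =
        (if firstGE end_ sums = 0 then q else sums.getD (firstGE end_ sums - 1) 0) := by
  intro sums
  induction sums with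
  | nil => intro i0 p q r areas; simp [splitLoopA, firstGE]
  | cons v rest ih =>
    intro i0 p q r areas
    by_cases hge : v ≥ end_
    · have h0 : firstGE end_ (v :: rest) = 0 := by simp [firstGE, hge]
      rw [h0]
      simp [splitLoopA, if_pos hge]
    · have hlt : v < end_ := lt_of_not_ge hge
      have hk : firstGE end_ (v :: rest) = firstGE end_ rest + 1 := by simp [firstGE, hge]
      have step : ∀ (p' r' : Int) (areas' : List (List Int)),
          (splitLoopA start end_ rest (i0 + 1) (p', v, r') areas').2.2.1 =
            (if firstGE end_ (v :: rest) = 0 then q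
             else (v :: rest).getD (firstGE end_ (v :: rest) - 1) 0) := by
        intro p' r' areas'
        rw [ih (i0 + 1) p' v r' areas', hk, if_neg (Nat.succ_ne_zero _)]
        by_cases hz : firstGE end_ rest = 0
        · rw [if_pos hz, hz]
          rfl
        · rw [if_neg hz]
          have h1 : firstGE end_ rest + 1 - 1 = (firstGE end_ rest - 1) + 1 := by omega
          rw [h1]
          rfl
      by_cases hs : start < v
      · simp only [splitLoopA, if_neg hge, if_pos (show start < v ∧ v < end_ from ⟨hs, hlt⟩)]
        exact step _ _ _
      · have hnot : ¬ (start < v ∧ v < end_) := fun h => hs h.1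
        simp only [splitLoopA, if_neg hge, if_neg hnot]
        exact step _ _ _

-- emittedRec equals B's index-based construction.
theorem filterMap_range_succ_shift {b : Type} (f : Nat → Option b) (n : Nat) :
    (List.range (n + 1)).filterMap f = (f 0).toList ++ (List.range n).filterMap (fun j => f (j + 1)) := by
  rw [List.range_succ_eq_map, List.filterMap_cons, List.filterMap_map]
  cases h : f 0 <;> simp

theorem emittedRec_eq (start end_ : Int) :
    ∀ (sums : List Int) (i0 : Nat) (q : Int),
      emittedRec start end_ sums i0 q =
        (List.range (firstGE end_ sums)).filterMap (fun j =>
          if sums.getD j 0 > start then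
            some [((i0 + j : Nat) : Int), (if j = 0 then q else sums.getD (j - 1) 0), sums.getD j 0]
          else none) := by
  intro sums
  induction sums with
  | nil => intro i0 q; simp [emittedRec, firstGE]
  | cons v rest ih =>
    intro i0 q
    by_cases hge : v ≥ end_
    · simp [emittedRec, firstGE, hge]
    · have hk : firstGE end_ (v :: rest) = firstGE end_ rest + 1 := by simp [firstGE, hge]
      rw [emittedRec, if_neg hge, hk, filterMap_range_succ_shift, ih (i0 + 1) v]
      congr 1
      · by_cases hs : start < v
        · simp [hs]
        · simp [hs]
      · apply List.filterMap_congr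
        intro j hj
        have g1 : (v :: rest).getD (j + 1) 0 = rest.getD j 0 := rfl
        have g2 : (v :: rest).getD (j + 1 - 1) 0 = (if j = 0 then v else rest.getD (j - 1) 0) := by
          cases j with
          | zero => rfl
          | succ m => rfl
        have g3 : i0 + 1 + j = i0 + (j + 1) := by omega
        simp only [g1, g2, g3, if_neg (Nat.succ_ne_zero j)]

-- ===== VERDICT (by name: the statement is the Claim_ definition above) =====
theorem split_by_chr_py_spec : Claim_equal_split_by_chr_py := by
  intro start end_ sums _
  unfold Spec_split_by_chr_py split_by_chr_py split_by_chr_py_alt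
  dsimp only
  rw [loopA_areas start end_ sums 0 0 start 0 [],
      loopA_idx start end_ sums 0 0 start 0 [],
      loopA_low start end_ sums 0 0 start 0 [],
      emittedRec_eq start end_ sums 0 start]
  simp
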